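-- pv_equiv track=rewrite | github.com/AbdulGh/WormSegmentation | Nodes.py | isEndPoint
-- ===== SOURCE A (Python) =====
-- def isEndPoint(neighbours):
--     """
--     Something is an endpoint if there 6 consecutive neighbours that are empty
--     """
--     x = 0
--     while x < len(neighbours):
--         if neighbours[x] == 0:
--             i = 1
--             while neighbours[(x + i) % len(neighbours)] == 0:
--                 i += 1
--                 if i == 6: return True
--             x = x + i + 1
--         else: x += 1
--     return False
-- ===== SOURCE B (Python) =====
-- def isEndPoint(neighbours):
--     """
--     Something is an endpoint if there are 6 consecutive neighbours (circularly) that are empty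
--     """
--     n = len(neighbours)
--     return any(all(neighbours[(x + j) % n] == 0 for j in range(6)) for x in range(n))
-- ===== Notes on version B (the rewrite author's own statement) =====
-- stated objective: simpler
-- what changed: Replaced A's pointer-skipping nested while scan (inner loop advances a cursor past examined zeros) with a one-line any/all test of every circular 6-element window, which also makes the all-zero wrap case fall out naturally instead of via loop state.
import Mathlib
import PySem

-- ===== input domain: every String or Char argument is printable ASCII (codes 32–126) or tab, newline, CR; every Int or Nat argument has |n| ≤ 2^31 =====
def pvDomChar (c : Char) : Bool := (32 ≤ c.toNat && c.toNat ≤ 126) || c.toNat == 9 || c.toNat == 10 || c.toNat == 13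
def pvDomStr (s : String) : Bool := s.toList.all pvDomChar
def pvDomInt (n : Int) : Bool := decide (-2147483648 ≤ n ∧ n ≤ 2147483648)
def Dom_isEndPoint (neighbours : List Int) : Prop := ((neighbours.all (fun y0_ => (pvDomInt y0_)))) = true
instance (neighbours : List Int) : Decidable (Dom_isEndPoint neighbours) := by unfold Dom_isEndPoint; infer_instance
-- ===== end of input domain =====

-- B replaces A's pointer-skipping nested while scan by an idiomatic any/all check of every
-- circular 6-window (objective: simpler; same O(n) cost up to the constant window factor).


-- ===== PORT A =====
-- inner while: `i` starts at 1 and the loop returns True as soon as i == 6, so at most 5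
-- iterations happen; `fuel` (called with 5) only makes that bound structural and is never
-- exhausted on a reachable path.  `none` = "return True", `some i` = loop exited with this i.
def isEndPointInnerA (ns : List Int) (x i : Nat) : Nat → Option Nat
  | 0 => none
  | fuel + 1 =>
    if ns.getD ((x + i) % ns.length) 0 == 0 then
      if i + 1 == 6 then none
      else isEndPointInnerA ns x (i + 1) fuel
    else some i

-- outer while: x strictly increases each iteration, so `ns.length - x` decreases
def isEndPointOuterA (ns : List Int) (x : Nat) : Bool :=
  if h : x < ns.length then
    if ns.getD x 0 == 0 then
      match isEndPointInnerA ns x 1 5 with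
      | none => true
      | some i => isEndPointOuterA ns (x + i + 1)
    else isEndPointOuterA ns (x + 1)
  else false
termination_by ns.length - x
decreasing_by all_goals omega

def isEndPoint (neighbours : List Int) : Bool := isEndPointOuterA neighbours 0

-- ===== PORT B =====
def isEndPoint_alt (neighbours : List Int) : Bool :=
  (List.range neighbours.length).any (fun x =>
    (List.range 6).all (fun j =>
      neighbours.getD ((x + j) % neighbours.length) 0 == 0))

-- ===== PRECONDITION & SPEC =====
def Spec_isEndPoint (neighbours : List Int) (out : Bool) : Prop := out = isEndPoint_alt neighbours
instance (neighbours : List Int) (out : Bool) : Decidable (Spec_isEndPoint neighbours out) := by unfold Spec_isEndPoint; infer_instance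

-- ===== CLAIM (what is proved, stated in full; the proofs are below) =====
def Claim_equal_isEndPoint : Prop := ∀ (neighbours : List Int), Dom_isEndPoint neighbours → Spec_isEndPoint neighbours (isEndPoint neighbours)

-- ===== LEMMAS AND PROOFS =====

-- a circular run of 6 zeros starting at y
def RunAt (ns : List Int) (y : Nat) : Prop :=
  ∀ j, j < 6 → ns.getD ((y + j) % ns.length) 0 = 0

-- if the inner loop "returns True", every position x+j (1 ≤ j < 6) holds a zero
lemma innerA_none (ns : List Int) (x : Nat) :
    ∀ fuel i, i + fuel = 6 → isEndPointInnerA ns x i fuel = none →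
      ∀ j, i ≤ j → j < 6 → ns.getD ((x + j) % ns.length) 0 = 0 := by
  intro fuel
  induction fuel with
  | zero => intro i hi _ j hij hj6; omega
  | succ fuel ih =>
    intro i hi hnone j hij hj6
    unfold isEndPointInnerA at hnone
    by_cases hz : ns.getD ((x + i) % ns.length) 0 == 0
    · rw [if_pos hz] at hnone
      by_cases h6 : i + 1 == 6
      · have : i = 5 := by have := (by simpa using h6 : i + 1 = 6); omega
        have : j = i := by omega
        subst this; exact eq_of_beq hz
      · rw [if_neg h6] at hnone
        rcases Nat.eq_or_lt_of_le hij with he | hl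
        · subst he; exact eq_of_beq hz
        · exact ih (i + 1) (by omega) hnone j hl hj6
    · rw [if_neg hz] at hnone; exact absurd hnone (by simp)

-- if the inner loop exits with `some i'`, position x+i' is nonzero and i' < 6
lemma innerA_some (ns : List Int) (x : Nat) :
    ∀ fuel i i', i + fuel ≤ 6 → isEndPointInnerA ns x i fuel = some i' →
      i ≤ i' ∧ i' < 6 ∧ ¬ ns.getD ((x + i') % ns.length) 0 = 0 := by
  intro fuel
  induction fuel with
  | zero => intro i i' _ h; exact absurd h (by simp [isEndPointInnerA])
  | succ fuel ih =>
    intro i i' hle hsome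
    unfold isEndPointInnerA at hsome
    by_cases hz : ns.getD ((x + i) % ns.length) 0 == 0
    · rw [if_pos hz] at hsome
      by_cases h6 : i + 1 == 6
      · rw [if_pos h6] at hsome; exact absurd hsome (by simp)
      · rw [if_neg h6] at hsome
        have := ih (i + 1) i' (by omega) hsome
        exact ⟨by omega, this.2.1, this.2.2⟩
    · rw [if_neg hz] at hsome
      have : i = i' := by simpa using hsome
      subst this
      exact ⟨le_refl _, by omega, by simpa using hz⟩

-- characterization of A's outer loop
lemma outerA_char (ns : List Int) :
    ∀ n x, ns.length - x ≤ n →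
      (isEndPointOuterA ns x = true ↔ ∃ y, x ≤ y ∧ y < ns.length ∧ RunAt ns y) := by
  intro n
  induction n with
  | zero =>
    intro x hx
    rw [isEndPointOuterA, dif_neg (by omega)]
    constructor
    · intro h; exact absurd h (by simp)
    · rintro ⟨y, hy1, hy2, -⟩; omega
  | succ n ih =>
    intro x hx
    by_cases hlt : x < ns.length
    · rw [isEndPointOuterA, dif_pos hlt]
      by_cases hz : ns.getD x 0 == 0
      · rw [if_pos hz]
        rcases hcase : isEndPointInnerA ns x 1 5 with _ | i
        · -- inner returned True: position x starts a run
          simp only [true_iff]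
          refine ⟨x, le_refl _, hlt, ?_⟩
          intro j hj
          rcases Nat.eq_zero_or_pos j with h0 | hpos
          · subst h0
            rw [Nat.add_zero, Nat.mod_eq_of_lt hlt]
            exact eq_of_beq hz
          · exact innerA_none ns x 5 1 (by omega) hcase j hpos hj
        · -- inner exited at nonzero x+i: no run can start in [x, x+i]
          obtain ⟨hi1, hi6, hnz⟩ := innerA_some ns x 5 1 i (by omega) hcase
          rw [ih (x + i + 1) (by omega)]
          constructor
          · rintro ⟨y, hy1, hy2, hr⟩; exact ⟨y, by omega, hy2, hr⟩
          · rintro ⟨y, hy1, hy2, hr⟩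
            refine ⟨y, ?_, hy2, hr⟩
            by_contra hlt'
            -- y ∈ [x, x+i]; then x+i = y + (x+i-y) with x+i-y < 6
            have hj : x + i - y < 6 := by omega
            have := hr (x + i - y) hj
            rw [show y + (x + i - y) = x + i by omega] at this
            exact hnz this
      · rw [if_neg hz]
        rw [ih (x + 1) (by omega)]
        constructor
        · rintro ⟨y, hy1, hy2, hr⟩; exact ⟨y, by omega, hy2, hr⟩
        · rintro ⟨y, hy1, hy2, hr⟩
          refine ⟨y, ?_, hy2, hr⟩
          by_contra hlt'
          have hy : y = x := by omega
          subst hy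
          have := hr 0 (by omega)
          rw [Nat.add_zero, Nat.mod_eq_of_lt hy2] at this
          exact hz (by simpa using this)
    · rw [isEndPointOuterA, dif_neg hlt]
      constructor
      · intro h; exact absurd h (by simp)
      · rintro ⟨y, hy1, hy2, -⟩; omega

-- characterization of B
lemma alt_char (ns : List Int) :
    isEndPoint_alt ns = true ↔ ∃ y, y < ns.length ∧ RunAt ns y := by
  simp [isEndPoint_alt, RunAt, List.any_eq_true, List.all_eq_true]

-- ===== VERDICT (by name: the statement is the Claim_ definition above) =====
theorem isEndPoint_spec : Claim_equal_isEndPoint := by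
  intro ns _
  unfold Spec_isEndPoint isEndPoint
  rw [Bool.eq_iff_iff, outerA_char ns ns.length 0 (by omega), alt_char]
  constructor
  · rintro ⟨y, -, hy, hr⟩; exact ⟨y, hy, hr⟩
  · rintro ⟨y, hy, hr⟩; exact ⟨y, Nat.zero_le _, hy, hr⟩
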